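-- pv_equiv track=rewrite | github.com/floatingskies/mark-mark | core/helix_mode.py | _find_paragraph
-- ===== SOURCE A (Python) =====
-- from typing import List, Tuple, Optional, Callable, Set
--
-- def _find_paragraph(content: str, pos: int, inner: bool) -> Optional[Tuple[int, int]]:
--     """Find paragraph boundaries."""
--     lines = content[:pos].count('\n')
--     all_lines = content.split('\n')
--
--     # Find paragraph start
--     start_line = lines
--     while start_line > 0 and all_lines[start_line - 1].strip():
--         start_line -= 1
--
--     # Find paragraph end
--     end_line = lines
--     while end_line < len(all_lines) - 1 and all_lines[end_line + 1].strip():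
--         end_line += 1
--
--     # Convert to character positions
--     start_pos = sum(len(all_lines[i]) + 1 for i in range(start_line))
--     end_pos = sum(len(all_lines[i]) + 1 for i in range(end_line + 1)) - 1
--
--     return (start_pos, end_pos)
-- ===== SOURCE B (Python) =====
-- def _find_paragraph(content, pos, inner):
--     """Paragraph bounds via nearest blank lines around the cursor line (staged passes, no expansion loops)."""
--     lines = content.split('\n')
--     cur = content[:pos].count('\n')
--     blanks = [i for i, ln in enumerate(lines) if not ln.strip()]
--     below = [i for i in blanks if i < cur]
--     above = [i for i in blanks if i > cur]
--     s = (below[-1] + 1) if below else 0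
--     e = (above[0] if above else len(lines)) - 1
--     offs = [0]
--     acc = 0
--     for ln in lines:
--         acc += len(ln) + 1
--         offs.append(acc)
--     return (offs[s], offs[e + 1] - 1)
-- ===== Notes on version B (the rewrite author's own statement) =====
-- stated objective: alternative
-- what changed: B drops A's bidirectional expand-while-non-blank while-loops and per-boundary re-summations: it lists the blank-line indices in one pass, selects the nearest blank line below/above the cursor line (last/first of a filtered list), and reads both character boundaries off a prefix-offset table built in a single accumulation pass.
import Mathlib
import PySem

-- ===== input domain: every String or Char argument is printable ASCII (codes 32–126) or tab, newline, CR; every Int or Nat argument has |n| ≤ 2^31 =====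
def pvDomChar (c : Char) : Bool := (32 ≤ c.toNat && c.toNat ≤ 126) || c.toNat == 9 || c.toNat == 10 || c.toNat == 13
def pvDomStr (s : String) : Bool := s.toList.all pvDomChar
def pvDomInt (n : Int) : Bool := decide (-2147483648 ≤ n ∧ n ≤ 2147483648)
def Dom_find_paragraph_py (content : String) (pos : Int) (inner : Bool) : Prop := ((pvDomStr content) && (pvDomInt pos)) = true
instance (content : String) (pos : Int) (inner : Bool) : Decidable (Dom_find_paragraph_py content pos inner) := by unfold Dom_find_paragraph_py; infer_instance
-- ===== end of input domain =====

-- B replaces A's bidirectional expand-while-non-blank loops and per-boundary re-summations by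
-- staged passes: list the blank-line indices once, select the nearest blank line below/above the
-- cursor line, and read both boundaries off a prefix-offset table; same O(n) cost.

-- ===== PORT A =====
-- 'while start_line > 0 and all_lines[start_line - 1].strip(): start_line -= 1'
def aStartLoop (all_lines : List String) : Nat → Nat
  | 0 => 0
  | k + 1 =>
    if !(PySem.Str.strip (PySem.List.pyGetD all_lines (k : Int) "") == "") then
      aStartLoop all_lines k
    else k + 1

-- 'while end_line < len(all_lines) - 1 and all_lines[end_line + 1].strip(): end_line += 1'
def aEndLoop (all_lines : List String) (e : Nat) : Nat :=
  if (e : Int) < (all_lines.length : Int) - 1 ∧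
      !(PySem.Str.strip (PySem.List.pyGetD all_lines ((e : Int) + 1) "") == "") then
    aEndLoop all_lines (e + 1)
  else e
termination_by all_lines.length - 1 - e
decreasing_by rename_i h; omega

def find_paragraph_py (content : String) (pos : Int) (inner : Bool) : Option (Int × Int) :=
  let lines : Nat := PySem.Str.count (PySem.Str.slice content none (some pos)) "\n"
  let all_lines : List String := (PySem.Str.split? content "\n").getD []
  let start_line := aStartLoop all_lines lines
  let end_line := aEndLoop all_lines lines
  let start_pos : Int :=
    ((List.range start_line).map
      (fun (i : Nat) => PySem.Str.len (PySem.List.pyGetD all_lines (i : Int) "") + 1)).sum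
  let end_pos : Int :=
    ((List.range (end_line + 1)).map
      (fun (i : Nat) => PySem.Str.len (PySem.List.pyGetD all_lines (i : Int) "") + 1)).sum - 1
  some (start_pos, end_pos)

-- ===== PORT B =====
def find_paragraph_py_alt (content : String) (pos : Int) (inner : Bool) : Option (Int × Int) :=
  let lines : List String := (PySem.Str.split? content "\n").getD []
  let cur : Int := (PySem.Str.count (PySem.Str.slice content none (some pos)) "\n" : Nat)
  -- blanks = [i for i, ln in enumerate(lines) if not ln.strip()]
  let blanks : List Int :=
    ((PySem.List.enumerate lines 0).filter (fun p => PySem.Str.strip p.2 == "")).map Prod.fst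
  let below : List Int := blanks.filter (fun i => i < cur)
  let above : List Int := blanks.filter (fun i => cur < i)
  -- s = (below[-1] + 1) if below else 0
  let s : Int := match below.getLast? with | some b => b + 1 | none => 0
  -- e = (above[0] if above else len(lines)) - 1
  let e : Int := (match above.head? with | some b => b | none => (lines.length : Int)) - 1
  -- offs = [0]; acc = 0; for ln in lines: acc += len(ln) + 1; offs.append(acc)
  let oa : List Int × Int :=
    lines.foldl
      (fun p ln => (p.1 ++ [p.2 + PySem.Str.len ln + 1], p.2 + PySem.Str.len ln + 1))
      ([0], 0)
  some (PySem.List.pyGetD oa.1 s 0, PySem.List.pyGetD oa.1 (e + 1) 0 - 1)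

-- ===== PRECONDITION & SPEC =====
def Spec_find_paragraph_py (content : String) (pos : Int) (inner : Bool) (out : Option (Int × Int)) : Prop := out = find_paragraph_py_alt content pos inner
instance (content : String) (pos : Int) (inner : Bool) (out : Option (Int × Int)) : Decidable (Spec_find_paragraph_py content pos inner out) := by unfold Spec_find_paragraph_py; infer_instance

-- ===== CLAIM (what is proved, stated in full; the proofs are below) =====
def Claim_equal_find_paragraph_py : Prop := ∀ (content : String) (pos : Int) (inner : Bool), Dom_find_paragraph_py content pos inner → Spec_find_paragraph_py content pos inner (find_paragraph_py content pos inner)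

-- ===== LEMMAS AND PROOFS =====

def pvLines : List Char → List (List Char)
  | [] => [[]]
  | c :: rest => if c = '\n' then [] :: pvLines rest else (pvLines rest).modifyHead (c :: ·)

theorem pvLines_ne_nil (cs : List Char) : pvLines cs ≠ [] := by
  induction cs with
  | nil => simp [pvLines]
  | cons c rest ih =>
    by_cases h : c = '\n' <;> cases hl : pvLines rest <;> simp_all [pvLines]

theorem pvLines_length (cs : List Char) : (pvLines cs).length = cs.count '\n' + 1 := by
  induction cs with
  | nil => simp [pvLines]
  | cons c rest ih =>
    by_cases h : c = '\n' <;>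
      simp [pvLines, h, ih, List.length_modifyHead]

theorem go_singleton (l : List Char) : ∀ (fuel : Nat) (cur : List Char) (acc : List (List Char)),
    l.length ≤ fuel →
    PySem.Chars.splitOn.go ['\n'] fuel l cur acc =
      acc.reverse ++ (pvLines l).modifyHead (cur.reverse ++ ·) := by
  induction l with
  | nil =>
    intro fuel cur acc _
    cases fuel <;> simp [PySem.Chars.splitOn.go, pvLines]
  | cons c rest ih =>
    intro fuel cur acc hf
    cases fuel with
    | zero => simp at hf
    | succ f =>
      have hf' : rest.length ≤ f := by simpa using hf
      by_cases h : c = '\n'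
      · subst h
        rw [PySem.Chars.splitOn.go]
        have hp : (['\n'].isPrefixOf ('\n' :: rest)) = true := by simp [List.isPrefixOf]
        simp only [hp, if_pos, List.length_cons, List.length_nil, Nat.zero_add, List.drop_succ_cons, List.drop_zero]
        rw [ih f [] _ hf']
        cases hl : pvLines rest with
        | nil => exact absurd hl (pvLines_ne_nil rest)
        | cons hd tl => simp [pvLines, hl]
      · rw [PySem.Chars.splitOn.go]
        have hp : (['\n'].isPrefixOf (c :: rest)) = false := by simp [List.isPrefixOf]; exact fun hh => h hh.symm
        simp only [hp, Bool.false_eq_true, if_false]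
        rw [ih f (c :: cur) acc hf']
        simp only [pvLines, if_neg h]
        cases hl : pvLines rest with
        | nil => exact absurd hl (pvLines_ne_nil rest)
        | cons hd tl => simp

theorem splitOn_eq_pvLines (cs : List Char) :
    PySem.Chars.splitOn cs ['\n'] = pvLines cs := by
  rw [PySem.Chars.splitOn, go_singleton cs (cs.length + 1) [] [] (by omega)]
  cases hl : pvLines cs with
  | nil => exact absurd hl (pvLines_ne_nil cs)
  | cons hd tl => simp

theorem count_go_singleton (c : Char) (l : List Char) : ∀ (fuel acc : Nat),
    l.length ≤ fuel →
    PySem.Chars.count.go [c] fuel l acc = acc + l.count c := by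
  induction l with
  | nil => intro fuel acc _; cases fuel <;> simp [PySem.Chars.count.go]
  | cons d rest ih =>
    intro fuel acc hf
    cases fuel with
    | zero => simp at hf
    | succ f =>
      have hf' : rest.length ≤ f := by simpa using hf
      by_cases h : d = c
      · subst h
        rw [PySem.Chars.count.go]
        have hp : ([d].isPrefixOf (d :: rest)) = true := by simp [List.isPrefixOf]
        simp only [hp, if_pos, List.length_cons, List.length_nil, Nat.zero_add,
          List.drop_succ_cons, List.drop_zero]
        rw [ih f (acc + 1) hf']
        simp
        omega
      · rw [PySem.Chars.count.go]
        have hp : ([c].isPrefixOf (d :: rest)) = false := by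
          simp [List.isPrefixOf]; exact fun hh => h hh.symm
        simp only [hp, Bool.false_eq_true, if_false]
        rw [ih f acc hf']
        simp [h]

theorem count_singleton (cs : List Char) (c : Char) :
    PySem.Chars.count cs [c] = cs.count c := by
  rw [PySem.Chars.count]
  simp only [List.isEmpty_cons, Bool.false_eq_true, if_false]
  rw [count_go_singleton c cs cs.length 0 (le_refl _)]
  omega

def pvS (L : List (List Char)) (k : Nat) : Nat :=
  ((L.take k).map (fun l => l.length + 1)).sum

theorem pvS_zero (L : List (List Char)) : pvS L 0 = 0 := by simp [pvS]

theorem pvS_cons (l : List Char) (L : List (List Char)) (k : Nat) :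
    pvS (l :: L) (k + 1) = l.length + 1 + pvS L k := by
  simp [pvS, List.take_succ_cons]

theorem pvS_succ (L : List (List Char)) (k : Nat) (hk : k < L.length) :
    pvS L (k + 1) = pvS L k + (L.getD k []).length + 1 := by
  induction L generalizing k with
  | nil => simp at hk
  | cons l L ih =>
    cases k with
    | zero => simp [pvS]
    | succ k =>
      rw [pvS_cons, pvS_cons, ih k (by simpa using hk)]
      simp
      omega

theorem getD_map_ofList (L : List (List Char)) (k : Nat) (hk : k < L.length) :
    (L.map String.ofList).getD k "" = String.ofList (L.getD k []) := by
  rw [List.getD_eq_getElem _ _ (by simpa using hk), List.getElem_map,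
      List.getD_eq_getElem _ _ hk]

theorem sum_len_eq_pvS (L : List (List Char)) : ∀ (k : Nat), k ≤ L.length →
    ((List.range k).map
        (fun (i : Nat) => PySem.Str.len (PySem.List.pyGetD (L.map String.ofList) (i : Int) "") + 1)).sum
      = ((pvS L k : Nat) : Int) := by
  intro k
  induction k with
  | zero => intro _; simp [pvS_zero]
  | succ k ih =>
    intro hk
    have hkl : k < L.length := by omega
    rw [List.range_succ, List.map_append, List.sum_append, ih (by omega)]
    simp only [List.map_cons, List.map_nil, List.sum_cons, List.sum_nil]
    rw [PySem.List.pyGetD_natCast, getD_map_ofList L k hkl,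
      PySem.Str.len_eq, String.toList_ofList, pvS_succ L k hkl]
    push_cast
    ring

theorem split_content (content : String) :
    PySem.Str.split? content "\n" = some ((pvLines content.toList).map String.ofList) := by
  have h := PySem.Str.split?_map content "\n"
  rw [show ("\n" : String).toList = ['\n'] from rfl] at h
  rw [PySem.Chars.split?] at h
  simp only [List.isEmpty_cons, Bool.false_eq_true, if_false] at h
  rw [splitOn_eq_pvLines] at h
  cases hs : PySem.Str.split? content "\n" with
  | none => rw [hs] at h; simp at h
  | some xs =>
    rw [hs] at h
    simp only [Option.map_some, Option.some.injEq] at h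
    congr 1
    rw [← h, List.map_map]
    conv_lhs => rw [← List.map_id xs]
    apply List.map_congr_left
    intro a _
    exact (String.ofList_toList (s := a)).symm

theorem lines_eq (content : String) (pos : Int) :
    PySem.Str.count (PySem.Str.slice content none (some pos)) "\n"
      = (content.toList.take (PySem.List.clampIdx content.toList.length pos)).count '\n' := by
  rw [PySem.Str.count_eq, PySem.Str.toList_slice,
    show ("\n" : String).toList = ['\n'] from rfl, count_singleton]
  congr 1

-- ---- characterization of A's start loop: last blank line below v, plus one ----

theorem aStart_char (all_lines : List String) : ∀ (v : Nat),
    aStartLoop all_lines v =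
      match ((List.range v).filter
          (fun (k : Nat) => PySem.Str.strip (PySem.List.pyGetD all_lines (k : Int) "") == "")).getLast? with
      | some b => b + 1
      | none => 0 := by
  intro v
  induction v with
  | zero => simp [aStartLoop]
  | succ k ih =>
    rw [show aStartLoop all_lines (k + 1)
        = if !(PySem.Str.strip (PySem.List.pyGetD all_lines (k : Int) "") == "") then
            aStartLoop all_lines k else k + 1 from rfl,
      List.range_succ, List.filter_append]
    by_cases h : PySem.Str.strip (PySem.List.pyGetD all_lines (k : Int) "") = ""
    · have hb : (PySem.Str.strip (PySem.List.pyGetD all_lines (k : Int) "") == "") = true :=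
        beq_iff_eq.mpr h
      have hf : (List.filter
          (fun (j : Nat) => PySem.Str.strip (PySem.List.pyGetD all_lines (j : Int) "") == "") [k])
          = [k] := by
        rw [List.filter_singleton]
        simp only [hb, Bool.cond_true]
      rw [hf, List.getLast?_concat, hb, Bool.not_true]
      rfl
    · have hb : (PySem.Str.strip (PySem.List.pyGetD all_lines (k : Int) "") == "") = false :=
        beq_eq_false_iff_ne.mpr h
      have hf : (List.filter
          (fun (j : Nat) => PySem.Str.strip (PySem.List.pyGetD all_lines (j : Int) "") == "") [k])
          = [] := by
        rw [List.filter_singleton]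
        simp only [hb, Bool.cond_false]
      rw [hf, List.append_nil, hb, Bool.not_false]
      rw [if_pos rfl, ih]

-- ---- characterization of A's end loop: first blank line above e, minus one ----

theorem head_filter_gt (l : List Nat) (hl : l.Pairwise (· < ·)) (e : Nat) (hm : e + 1 ∈ l) :
    (l.filter (fun k => decide (e < k))).head? = some (e + 1) := by
  have hl' : (l.filter (fun k => decide (e < k))).Pairwise (· < ·) :=
    hl.sublist List.filter_sublist
  have hm' : e + 1 ∈ l.filter (fun k => decide (e < k)) := by
    simp [List.mem_filter, hm]
  cases hll : l.filter (fun k => decide (e < k)) with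
  | nil => rw [hll] at hm'; simp at hm'
  | cons h t =>
    rw [hll] at hm' hl'
    have hh : e < h := by
      have : h ∈ l.filter (fun k => decide (e < k)) := by rw [hll]; exact List.mem_cons_self
      simpa using (List.mem_filter.mp this).2
    rcases List.mem_cons.mp hm' with h1 | h2
    · simp [h1]
    · exact absurd ((List.pairwise_cons.mp hl').1 _ h2) (by omega)

theorem aEnd_char (all_lines : List String) : ∀ (m e : Nat),
    all_lines.length - 1 - e ≤ m → e < all_lines.length →
    aEndLoop all_lines e =
      match (((List.range all_lines.length).filter
            (fun (k : Nat) => PySem.Str.strip (PySem.List.pyGetD all_lines (k : Int) "") == "")).filter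
          (fun k => decide (e < k))).head? with
      | some b => b - 1
      | none => all_lines.length - 1 := by
  intro m
  induction m with
  | zero =>
    intro e hm he
    have he' : e = all_lines.length - 1 := by omega
    rw [aEndLoop, if_neg (by omega)]
    have hnil : (((List.range all_lines.length).filter
          (fun (k : Nat) => PySem.Str.strip (PySem.List.pyGetD all_lines (k : Int) "") == "")).filter
        (fun k => decide (e < k))) = [] := by
      rw [List.filter_eq_nil_iff]
      intro k hk
      have : k < all_lines.length := List.mem_range.mp (List.mem_of_mem_filter hk)
      simp; omega
    rw [hnil, he']
    rfl
  | succ m ih =>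
    intro e hm he
    rw [aEndLoop]
    by_cases hel : e < all_lines.length - 1
    · have hcast : ((e : Int) + 1) = ((e + 1 : Nat) : Int) := by push_cast; ring
      by_cases hb :
          (PySem.Str.strip (PySem.List.pyGetD all_lines ((e + 1 : Nat) : Int) "") == "") = true
      · rw [if_neg (fun hc => by
          have h2 := hc.2
          rw [hcast] at h2
          rw [hb] at h2
          simp at h2)]
        have hmem : e + 1 ∈ ((List.range all_lines.length).filter
            (fun (k : Nat) => PySem.Str.strip (PySem.List.pyGetD all_lines (k : Int) "") == "")) := by
          rw [List.mem_filter]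
          exact ⟨List.mem_range.mpr (by omega), hb⟩
        rw [head_filter_gt _ (List.pairwise_lt_range.sublist List.filter_sublist) e hmem]
        simp
      · have hx : (PySem.Str.strip (PySem.List.pyGetD all_lines ((e + 1 : Nat) : Int) "") == "")
            = false := by simpa using hb
        rw [if_pos ⟨by exact_mod_cast (by omega : (e : Int) < (all_lines.length : Int) - 1),
          by rw [hcast, hx]; rfl⟩]
        rw [ih (e + 1) (by omega) (by omega)]
        have hfe : (((List.range all_lines.length).filter
              (fun (k : Nat) => PySem.Str.strip (PySem.List.pyGetD all_lines (k : Int) "") == "")).filter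
            (fun k => decide (e < k)))
          = (((List.range all_lines.length).filter
              (fun (k : Nat) => PySem.Str.strip (PySem.List.pyGetD all_lines (k : Int) "") == "")).filter
            (fun k => decide (e + 1 < k))) := by
          apply List.filter_congr
          intro k hk
          have hkb := (List.mem_filter.mp hk).2
          have : k ≠ e + 1 := fun hc => hb (by rw [← hc]; exact hkb)
          simp; omega
        rw [hfe]
    · rw [if_neg (fun hc => by
        have h1 := hc.1
        have : (e : Int) < (all_lines.length : Int) - 1 := h1
        omega)]
      have he' : e = all_lines.length - 1 := by omega
      have hnil : (((List.range all_lines.length).filter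
            (fun (k : Nat) => PySem.Str.strip (PySem.List.pyGetD all_lines (k : Int) "") == "")).filter
          (fun k => decide (e < k))) = [] := by
        rw [List.filter_eq_nil_iff]
        intro k hk
        have : k < all_lines.length := List.mem_range.mp (List.mem_of_mem_filter hk)
        simp; omega
      rw [hnil, he']
      rfl

-- ---- B's blanks list in terms of range/filter ----

theorem filter_lt_range (P : Nat → Bool) (L v : Nat) (hv : v ≤ L) :
    ((List.range L).filter P).filter (fun k => decide (k < v))
      = (List.range v).filter P := by
  rw [List.filter_filter,
    show L = v + (L - v) from by omega, List.range_add, List.filter_append]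
  have h2 : ((List.range (L - v)).map (v + ·)).filter
      (fun (k : Nat) => decide (k < v) && P k) = [] := by
    rw [List.filter_eq_nil_iff]
    intro k hk
    rcases List.mem_map.mp hk with ⟨j, _, rfl⟩
    simp
  rw [h2, List.append_nil]
  apply List.filter_congr
  intro k hk
  have : k < v := List.mem_range.mp hk
  simp [this]

theorem filter_map_cast_lt (l : List Nat) (v : Nat) :
    (l.map (fun (k : Nat) => (k : Int))).filter (fun (i : Int) => i < ((v : Nat) : Int))
      = (l.filter (fun (k : Nat) => decide (k < v))).map (fun (k : Nat) => (k : Int)) := by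
  rw [List.filter_map]
  congr 1
  apply List.filter_congr
  intro k _
  simp

theorem filter_map_cast_gt (l : List Nat) (v : Nat) :
    (l.map (fun (k : Nat) => (k : Int))).filter (fun (i : Int) => ((v : Nat) : Int) < i)
      = (l.filter (fun (k : Nat) => decide (v < k))).map (fun (k : Nat) => (k : Int)) := by
  rw [List.filter_map]
  congr 1
  apply List.filter_congr
  intro k _
  simp

-- ---- B's offsets fold ----

def offS (xs : List String) (k : Nat) : Int :=
  ((xs.take k).map (fun l => PySem.Str.len l + 1)).sum

theorem offS_zero (xs : List String) : offS xs 0 = 0 := by simp [offS]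

theorem fold_offs (xs : List String) : ∀ (o : List Int) (a : Int),
    xs.foldl
        (fun p ln => (p.1 ++ [p.2 + PySem.Str.len ln + 1], p.2 + PySem.Str.len ln + 1))
        (o, a)
      = (o ++ (List.range xs.length).map (fun k => a + offS xs (k + 1)),
         a + offS xs xs.length) := by
  induction xs with
  | nil => intro o a; simp [offS]
  | cons x xs ih =>
    intro o a
    rw [List.foldl_cons, ih]
    have hS : ∀ k, offS (x :: xs) (k + 1) = PySem.Str.len x + 1 + offS xs k := by
      intro k
      simp only [offS, List.take_succ_cons, List.map_cons, List.sum_cons]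
    simp only [Prod.mk.injEq, List.length_cons]
    refine ⟨?_, ?_⟩
    · rw [List.range_succ_eq_map, List.map_cons, List.map_map,
        List.append_assoc, List.singleton_append,
        show a + offS (x :: xs) (0 + 1) = a + PySem.Str.len x + 1 from by
          rw [hS 0, offS_zero]; ring,
        show List.map ((fun k => a + offS (x :: xs) (k + 1)) ∘ Nat.succ) (List.range xs.length)
            = List.map (fun k => a + PySem.Str.len x + 1 + offS xs (k + 1)) (List.range xs.length) from
          List.map_congr_left (fun k _ => by
            simp only [Function.comp_apply]
            rw [hS (k + 1)]
            ring)]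
    · rw [hS xs.length]
      ring

theorem offS_eq_pvS (L : List (List Char)) (k : Nat) :
    offS (L.map String.ofList) k = ((pvS L k : Nat) : Int) := by
  rw [offS, pvS, ← List.map_take, List.map_map, Nat.cast_list_sum, List.map_map]
  congr 1
  apply List.map_congr_left
  intro l _
  simp only [Function.comp_apply, PySem.Str.len_eq, String.toList_ofList]
  push_cast; ring

theorem offs_eq_starts (L : List (List Char)) :
    (0 : Int) :: (List.range L.length).map (fun k => (0 : Int) + offS (L.map String.ofList) (k + 1))
      = (List.range (L.length + 1)).map (fun (k : Nat) => ((pvS L k : Nat) : Int)) := by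
  rw [List.range_succ_eq_map, List.map_cons, List.map_map,
    show ((pvS L 0 : Nat) : Int) = 0 from by simp [pvS_zero],
    show List.map ((fun (k : Nat) => ((pvS L k : Nat) : Int)) ∘ Nat.succ) (List.range L.length)
        = List.map (fun k => (0 : Int) + offS (L.map String.ofList) (k + 1)) (List.range L.length) from
      List.map_congr_left (fun k _ => by
        simp only [Function.comp_apply]
        rw [offS_eq_pvS]
        ring)]

-- ===== VERDICT (by name: the statement is the Claim_ definition above) =====
theorem find_paragraph_py_spec : Claim_equal_find_paragraph_py := by
  intro content pos inner _
  show find_paragraph_py content pos inner = find_paragraph_py_alt content pos inner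
  simp only [find_paragraph_py, find_paragraph_py_alt]
  rw [split_content content]
  simp only [Option.getD_some]
  have hL1 : 1 ≤ (pvLines content.toList).length := by
    rw [pvLines_length]; omega
  have hlen : ((pvLines content.toList).map String.ofList).length
      = (pvLines content.toList).length := by simp
  have hvL : PySem.Str.count (PySem.Str.slice content none (some pos)) "\n" + 1
      ≤ (pvLines content.toList).length := by
    rw [lines_eq content pos, pvLines_length]
    have := (List.take_sublist (PySem.List.clampIdx content.toList.length pos)
        content.toList).count_le '\n'
    omega
  set Lns := pvLines content.toList with hLns
  set lines := Lns.map String.ofList with hlines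
  set L := Lns.length with hL
  set v : Nat := PySem.Str.count (PySem.Str.slice content none (some pos)) "\n" with hv
  -- B's blanks
  have hblanks :
      ((PySem.List.enumerate lines 0).filter (fun p => PySem.Str.strip p.2 == "")).map Prod.fst
        = (((List.range L).filter
            (fun (k : Nat) => PySem.Str.strip (PySem.List.pyGetD lines (k : Int) "") == "")).map
          (fun (k : Nat) => (k : Int))) := by
    rw [PySem.List.enumerate_eq_map_pyRange lines "", List.filter_map, List.map_map,
      show PySem.List.len lines = ((L : Nat) : Int) from by
        rw [PySem.List.len_eq, hlen],
      PySem.List.pyRange_zero_natCast, List.filter_map, List.map_map]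
    rfl
  rw [hblanks]
  -- start side
  rw [aStart_char lines v, hlen,
    filter_map_cast_lt, filter_lt_range _ L v (by omega)]
  -- end side
  rw [aEnd_char lines (lines.length - 1 - v) v (by omega) (by omega), hlen,
    filter_map_cast_gt]
  -- offsets
  rw [fold_offs lines [0] 0]
  simp only [List.singleton_append]
  rw [hlines]
  simp only [List.length_map]
  rw [offs_eq_starts Lns, ← hlines, ← hL]
  -- case analysis on the two selected blank indices
  set gS := (List.range v).filter
    (fun (k : Nat) => PySem.Str.strip (PySem.List.pyGetD lines (k : Int) "") == "") with hgS
  set gE := ((List.range L).filter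
      (fun (k : Nat) => PySem.Str.strip (PySem.List.pyGetD lines (k : Int) "") == "")).filter
    (fun k => decide (v < k)) with hgE
  rw [List.getLast?_map, List.head?_map]
  have hsub :
      ∀ (sN eN1 : Nat), sN ≤ L → eN1 ≤ L →
      (some (((List.range sN).map
          (fun (i : Nat) => PySem.Str.len (PySem.List.pyGetD lines (i : Int) "") + 1)).sum,
        ((List.range eN1).map
          (fun (i : Nat) => PySem.Str.len (PySem.List.pyGetD lines (i : Int) "") + 1)).sum - 1)
        : Option (Int × Int))
      = some (PySem.List.pyGetD
            ((List.range (L + 1)).map (fun (k : Nat) => ((pvS Lns k : Nat) : Int))) ((sN : Nat) : Int) 0,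
          PySem.List.pyGetD
            ((List.range (L + 1)).map (fun (k : Nat) => ((pvS Lns k : Nat) : Int))) ((eN1 : Nat) : Int) 0
            - 1) := by
    intro sN eN1 hs he
    rw [hlines, sum_len_eq_pvS Lns sN hs, sum_len_eq_pvS Lns eN1 he,
      PySem.List.pyGetD_natCast, PySem.List.pyGetD_natCast,
      PySem.List.getD_map_range _ _ _ _ (by omega), PySem.List.getD_map_range _ _ _ _ (by omega)]
  cases hgl : gS.getLast? with
  | none =>
    cases hge : gE.head? with
    | none =>
      have h1 : ((L - 1 + 1 : Nat) : Int) = ((L : Int)) - 1 + 1 := by push_cast; omega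
      have := hsub 0 (L - 1 + 1) (by omega) (by omega)
      simpa [h1] using this
    | some b =>
      have hbmem : b ∈ gE := List.mem_of_mem_head? (by rw [hge]; rfl)
      have hb1 : v < b ∧ b < L := by
        rw [hgE] at hbmem
        have h2 := (List.mem_filter.mp hbmem).2
        have h3 := List.mem_range.mp (List.mem_of_mem_filter (List.mem_of_mem_filter hbmem))
        exact ⟨by simpa using h2, h3⟩
      have h1 : ((b - 1 + 1 : Nat) : Int) = (b : Int) := by push_cast; omega
      have := hsub 0 (b - 1 + 1) (by omega) (by omega)
      simpa [h1] using this
  | some b =>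
    have hbmem : b ∈ gS := List.mem_of_mem_getLast? (by rw [hgl]; rfl)
    have hbv : b < v := by
      rw [hgS] at hbmem
      exact List.mem_range.mp (List.mem_of_mem_filter hbmem)
    have hcast : ((b + 1 : Nat) : Int) = (b : Int) + 1 := by push_cast; ring
    cases hge : gE.head? with
    | none =>
      have h1 : ((L - 1 + 1 : Nat) : Int) = ((L : Int)) - 1 + 1 := by push_cast; omega
      have := hsub (b + 1) (L - 1 + 1) (by omega) (by omega)
      simpa [h1, hcast] using this
    | some c =>
      have hcmem : c ∈ gE := List.mem_of_mem_head? (by rw [hge]; rfl)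
      have hc1 : v < c ∧ c < L := by
        rw [hgE] at hcmem
        have h2 := (List.mem_filter.mp hcmem).2
        have h3 := List.mem_range.mp (List.mem_of_mem_filter (List.mem_of_mem_filter hcmem))
        exact ⟨by simpa using h2, h3⟩
      have h1 : ((c - 1 + 1 : Nat) : Int) = (c : Int) := by push_cast; omega
      have := hsub (b + 1) (c - 1 + 1) (by omega) (by omega)
      simpa [h1, hcast] using this
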